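-- pv_equiv track=rewrite | github.com/adpndtPurpleStyleLabs/Psl_helper | VendorsInvoicePdfToExcel/helper.py | lastIndexOfContainsInList
-- ===== SOURCE A (Python) =====
-- def lastIndexOfContainsInList(list, word):
--     newList = list[::-1]
--     count = len(list)
--     for alist in newList:
--         if str(alist).__contains__(word):
--             return count
--         count -= 1
--     return -1
-- ===== SOURCE B (Python) =====
-- def lastIndexOfContainsInList(list, word):
--     result = -1
--     for i, x in enumerate(list):
--         if word in str(x):
--             result = i + 1
--     return result
-- ===== Notes on version B (the rewrite author's own statement) =====
-- stated objective: simpler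
-- what changed: Replaces the reversed-copy scan with early return by a single forward pass that overwrites a last-match accumulator (no list[::-1] copy, no manual countdown).
import Mathlib
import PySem

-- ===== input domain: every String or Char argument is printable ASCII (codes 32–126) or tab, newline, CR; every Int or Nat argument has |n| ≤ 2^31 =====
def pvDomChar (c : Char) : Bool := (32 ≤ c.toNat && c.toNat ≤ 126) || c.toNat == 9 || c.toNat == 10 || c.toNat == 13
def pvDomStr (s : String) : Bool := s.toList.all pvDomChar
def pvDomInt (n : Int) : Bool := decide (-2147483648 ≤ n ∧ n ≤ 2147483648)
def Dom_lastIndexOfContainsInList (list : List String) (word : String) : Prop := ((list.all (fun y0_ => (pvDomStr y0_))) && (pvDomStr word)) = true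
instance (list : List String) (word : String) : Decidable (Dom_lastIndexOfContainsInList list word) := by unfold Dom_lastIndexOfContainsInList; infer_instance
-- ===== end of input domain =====

-- B replaces A's reversed-copy scan with early return by a single forward pass that
-- overwrites a last-match accumulator (objective: simpler).

-- ===== PORT A =====
-- the for-loop of A: walk the reversed list, returning count at the first match
def pvAGo (word : String) : List String → Int → Int
  | [], _ => -1
  | a :: rest, count =>
      if PySem.Str.isIn word a then count else pvAGo word rest (count - 1)

def lastIndexOfContainsInList (list : List String) (word : String) : Int :=
  let newList := (PySem.List.slice? list none none (-1)).getD []   -- list[::-1]; step -1 ≠ 0 so never none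
  pvAGo word newList (list.length : Int)

-- ===== PORT B =====
def lastIndexOfContainsInList_alt (list : List String) (word : String) : Int :=
  (PySem.List.enumerate list 0).foldl
    (fun r p => if PySem.Str.isIn word p.2 then p.1 + 1 else r) (-1)

-- ===== PRECONDITION & SPEC =====
def Spec_lastIndexOfContainsInList (list : List String) (word : String) (out : Int) : Prop := out = lastIndexOfContainsInList_alt list word
instance (list : List String) (word : String) (out : Int) : Decidable (Spec_lastIndexOfContainsInList list word out) := by unfold Spec_lastIndexOfContainsInList; infer_instance

-- ===== CLAIM (what is proved, stated in full; the proofs are below) =====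
def Claim_equal_lastIndexOfContainsInList : Prop := ∀ (list : List String) (word : String), Dom_lastIndexOfContainsInList list word → Spec_lastIndexOfContainsInList list word (lastIndexOfContainsInList list word)

-- ===== LEMMAS AND PROOFS =====

theorem pvKey (word : String) (xs : List String) :
    pvAGo word xs.reverse (xs.length : Int) =
      (PySem.List.enumerate xs 0).foldl
        (fun r p => if PySem.Str.isIn word p.2 then p.1 + 1 else r) (-1) := by
  induction xs using List.reverseRecOn with
  | nil => rfl
  | append_singleton ys x ih =>
      rw [List.reverse_append, PySem.List.enumerate_append]
      simp only [List.reverse_singleton, List.singleton_append, List.length_append,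
        List.length_singleton, PySem.List.enumerate_cons, PySem.List.enumerate_nil,
        List.foldl_append, List.foldl_cons, List.foldl_nil, pvAGo]
      split_ifs with h
      · push_cast; ring
      · rw [show ((ys.length + 1 : Nat) : Int) - 1 = (ys.length : Int) by push_cast; ring]
        simpa using ih

-- ===== VERDICT (by name: the statement is the Claim_ definition above) =====
theorem lastIndexOfContainsInList_spec : Claim_equal_lastIndexOfContainsInList := by
  intro list word _
  unfold Spec_lastIndexOfContainsInList lastIndexOfContainsInList
  rw [PySem.List.slice?_none_none_neg_one]
  simpa using pvKey word list
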